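-- pv_equiv track=rewrite | github.com/pypy/pypy | pypy/interpreter/test/test_location.py | lnotab_offset2lineno
-- ===== SOURCE A (Python) =====
-- def lnotab_offset2lineno(tab, line, stopat):
--     addr = 0
--     for i in range(0, len(tab), 2):
--         addr = addr + ord(tab[i])
--         if addr > stopat:
--             break
--         line_offset = ord(tab[i+1])
--         if line_offset > 0x80:
--             line_offset -= 0x100
--         line = line + line_offset
--     return line
-- ===== SOURCE B (Python) =====
-- def lnotab_offset2lineno(tab, line, stopat):
--     # phase 1: cumulative address of every (possibly dangling) instruction pair
--     addrs = []
--     total = 0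
--     i = 0
--     while i < len(tab):
--         total += ord(tab[i])
--         addrs.append(total)
--         i += 2
--     # phase 2: number of leading pairs whose cumulative address is <= stopat
--     k = 0
--     while k < len(addrs) and addrs[k] <= stopat:
--         k += 1
--     # phase 3: add the signed line offsets of exactly those surviving pairs
--     delta = 0
--     i = 0
--     while k > 0:
--         o = ord(tab[i + 1])
--         delta += o - 0x100 if o > 0x80 else o
--         i += 2
--         k -= 1
--     return line + delta
-- ===== Notes on version B (the rewrite author's own statement) =====
-- stated objective: alternative
-- what changed: Replaces A's single fused loop (running address and running line updated together, with an early break) by a three-phase pipeline: build the list of cumulative pair addresses, count the leading pairs whose cumulative address is <= stopat, then sum the signed line offsets of exactly those surviving pairs.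
import Mathlib
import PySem

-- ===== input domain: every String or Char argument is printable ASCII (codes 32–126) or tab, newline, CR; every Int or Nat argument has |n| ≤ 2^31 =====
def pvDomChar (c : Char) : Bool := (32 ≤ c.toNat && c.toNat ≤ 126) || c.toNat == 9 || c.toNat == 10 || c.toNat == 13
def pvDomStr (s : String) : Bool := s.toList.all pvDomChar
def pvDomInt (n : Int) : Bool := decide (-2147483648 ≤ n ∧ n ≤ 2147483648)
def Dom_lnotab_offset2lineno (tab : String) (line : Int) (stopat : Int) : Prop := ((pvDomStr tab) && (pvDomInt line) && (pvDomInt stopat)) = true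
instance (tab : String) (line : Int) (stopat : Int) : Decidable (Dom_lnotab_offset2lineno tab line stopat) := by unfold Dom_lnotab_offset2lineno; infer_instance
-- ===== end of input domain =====

-- B replaces A's fused one-pass loop (running address and running line with an early break) by three
-- separate phases: cumulative pair addresses, a cutoff count, then a sum of the surviving signed
-- line offsets (objective: alternative decomposition, same O(n) cost).

-- ===== PORT A =====
-- A's 'for i in range(0, len(tab), 2)' loop with break, as the obvious two-at-a-time structural
-- recursion over the same state (addr, line).
def pvLoopA : List Char → Int → Int → Int → Int
  | [], _, line, _ => line
  | c :: rest, addr, line, stopat =>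
      let addr := addr + (c.toNat : Int)
      if addr > stopat then line
      else
        match rest with
        | [] => line  -- Python raises IndexError on tab[i+1] here; excluded by Pre_
        | o :: rest' =>
            let lineOffset : Int := (o.toNat : Int)
            let lineOffset := if lineOffset > 0x80 then lineOffset - 0x100 else lineOffset
            pvLoopA rest' addr (line + lineOffset) stopat

def lnotab_offset2lineno (tab : String) (line : Int) (stopat : Int) : Int :=
  pvLoopA tab.toList 0 line stopat

-- ===== PORT B =====
-- phase 1: 'while i < len(tab): total += ord(tab[i]); addrs.append(total); i += 2'
-- (the remaining suffix of tab.toList stands for the index i)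
def pvAddrsB : List Char → Int → List Int
  | [], _ => []
  | c :: rest, total =>
      let total := total + (c.toNat : Int)
      total :: pvAddrsB (rest.drop 1) total
termination_by l _ => l.length
decreasing_by simp

-- phase 2: 'while k < len(addrs) and addrs[k] <= stopat: k += 1'
def pvCountB : List Int → Int → Nat
  | [], _ => 0
  | a :: rest, stopat => if a ≤ stopat then pvCountB rest stopat + 1 else 0

-- phase 3: 'while k > 0: o = ord(tab[i + 1]); delta += …; i += 2; k -= 1'
-- (again the remaining suffix stands for the index i)
def pvDeltaB : List Char → Nat → Int → Int
  | _, 0, delta => delta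
  | [], _ + 1, delta => delta    -- Python raises IndexError on tab[i + 1]; excluded by Pre_
  | [_], _ + 1, delta => delta   -- Python raises IndexError on tab[i + 1]; excluded by Pre_
  | _ :: o :: rest, k + 1, delta =>
      let off : Int := (o.toNat : Int)
      let off := if off > 0x80 then off - 0x100 else off
      pvDeltaB rest k (delta + off)

def lnotab_offset2lineno_alt (tab : String) (line : Int) (stopat : Int) : Int :=
  let addrs := pvAddrsB tab.toList 0
  let k := pvCountB addrs stopat
  line + pvDeltaB tab.toList k 0

-- ===== PRECONDITION & SPEC =====
-- Pre_ excludes exactly the inputs where Python A raises IndexError on tab[i+1]: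
-- an odd-length tab whose even-index byte values sum to at most stopat, so the
-- loop reaches the dangling last byte without breaking. (Python B raises there too.)
def Pre_lnotab_offset2lineno (tab : String) (line : Int) (stopat : Int) : Prop :=
  tab.toList.length % 2 = 0 ∨
    stopat < ((tab.toList.zipIdx.filter (fun p => p.2 % 2 = 0)).map (fun p => (p.1.toNat : Int))).sum

instance (tab : String) (line : Int) (stopat : Int) : Decidable (Pre_lnotab_offset2lineno tab line stopat) := by
  unfold Pre_lnotab_offset2lineno; infer_instance

def pvWitness_lnotab_offset2lineno : String × Int × Int := ("a!", 1, 100)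

def Spec_lnotab_offset2lineno (tab : String) (line : Int) (stopat : Int) (out : Int) : Prop := out = lnotab_offset2lineno_alt tab line stopat
instance (tab : String) (line : Int) (stopat : Int) (out : Int) : Decidable (Spec_lnotab_offset2lineno tab line stopat out) := by unfold Spec_lnotab_offset2lineno; infer_instance

-- ===== CLAIM (what is proved, stated in full; the proofs are below) =====
def Claim_equal_lnotab_offset2lineno : Prop := ∀ (tab : String) (line : Int) (stopat : Int), Dom_lnotab_offset2lineno tab line stopat → Pre_lnotab_offset2lineno tab line stopat → Spec_lnotab_offset2lineno tab line stopat (lnotab_offset2lineno tab line stopat)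

-- ===== LEMMAS AND PROOFS =====

-- phase 3 is an accumulator loop: pulling the accumulator out front
theorem pvDeltaB_acc (k : Nat) : ∀ (l : List Char) (d : Int),
    pvDeltaB l k d = d + pvDeltaB l k 0 := by
  induction k with
  | zero => intro l d; simp [pvDeltaB]
  | succ k ih =>
      intro l d
      match l with
      | [] => simp [pvDeltaB]
      | [c] => simp [pvDeltaB]
      | c :: o :: rest =>
          simp only [pvDeltaB]
          rw [ih rest (d + _), ih rest (0 + _)]
          ring

-- the fused loop equals the three-phase pipeline, for every tab (both ports
-- return the running 'line' at Python's shared IndexError point)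
theorem pvLoop_eq_phases (n : Nat) : ∀ (l : List Char), l.length ≤ n → ∀ (addr line stopat : Int),
    pvLoopA l addr line stopat = line + pvDeltaB l (pvCountB (pvAddrsB l addr) stopat) 0 := by
  induction n with
  | zero =>
      intro l hl addr line stopat
      match l with
      | [] => simp [pvLoopA, pvAddrsB, pvCountB, pvDeltaB]
  | succ n ih =>
      intro l hl addr line stopat
      match l with
      | [] => simp [pvLoopA, pvAddrsB, pvCountB, pvDeltaB]
      | [c] =>
          by_cases hb : addr + (c.toNat : Int) > stopat
          · simp [pvLoopA, pvAddrsB, pvCountB, pvDeltaB, hb,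
              show ¬ addr + (c.toNat : Int) ≤ stopat by omega]
          · simp [pvLoopA, pvAddrsB, pvCountB, pvDeltaB, hb,
              show addr + (c.toNat : Int) ≤ stopat by omega]
      | c :: o :: rest =>
          have hr : rest.length ≤ n := by simp at hl; omega
          by_cases hb : addr + (c.toNat : Int) > stopat
          · simp [pvLoopA, pvAddrsB, pvCountB, pvDeltaB, hb, not_le.mpr]
          · simp only [pvLoopA, pvAddrsB, pvCountB, List.drop_one, List.tail_cons]
            rw [if_neg hb, if_pos (show addr + (c.toNat : Int) ≤ stopat by omega)]
            simp only [pvDeltaB]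
            rw [ih rest hr, pvDeltaB_acc _ rest (0 + _)]
            ring

-- ===== VERDICT (by name: the statement is the Claim_ definition above) =====
theorem lnotab_offset2lineno_spec : Claim_equal_lnotab_offset2lineno := by
  intro tab line stopat _ _
  unfold Spec_lnotab_offset2lineno lnotab_offset2lineno lnotab_offset2lineno_alt
  exact pvLoop_eq_phases tab.toList.length tab.toList le_rfl 0 line stopat
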